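-- pv_equiv track=rewrite | github.com/openlawteam/gate | gate/fixer_polish.py | _sort_by_fixability
-- ===== SOURCE A (Python) =====
-- _FIXABILITY_ORDER = {"trivial": 0, "scoped": 1, "unknown": 2, "broad": 3}
--
-- def _sort_by_fixability(findings: list[dict]) -> list[dict]:
--     """Sort findings trivial → scoped → unknown → broad.
--
--     Keeps stable order within each bucket so the same PR produces the
--     same checkpoint sequence across retries (makes live logs easier
--     to diff).
--     """
--     indexed = sorted(
--         enumerate(findings),
--         key=lambda pair: (
--             _FIXABILITY_ORDER.get(pair[1].get("fixability", "unknown"), 2),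
--             pair[0],
--         ),
--     )
--     return [f for _, f in indexed]
-- ===== SOURCE B (Python) =====
-- _FIXABILITY_ORDER = {"trivial": 0, "scoped": 1, "unknown": 2, "broad": 3}
--
--
-- def _sort_by_fixability(findings: list[dict]) -> list[dict]:
--     """Stable bucket sort: one pass distributing findings into the four
--     ordered buckets, then concatenate them in category order."""
--     buckets = ([], [], [], [])
--     for f in findings:
--         buckets[_FIXABILITY_ORDER.get(f.get("fixability", "unknown"), 2)].append(f)
--     return buckets[0] + buckets[1] + buckets[2] + buckets[3]
-- ===== Notes on version B (the rewrite author's own statement) =====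
-- stated objective: alternative
-- what changed: Replaces the comparison sort over (category, original-index) tuple keys by a single-pass stable bucket sort into the four ordered category buckets followed by concatenation.
import Mathlib
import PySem

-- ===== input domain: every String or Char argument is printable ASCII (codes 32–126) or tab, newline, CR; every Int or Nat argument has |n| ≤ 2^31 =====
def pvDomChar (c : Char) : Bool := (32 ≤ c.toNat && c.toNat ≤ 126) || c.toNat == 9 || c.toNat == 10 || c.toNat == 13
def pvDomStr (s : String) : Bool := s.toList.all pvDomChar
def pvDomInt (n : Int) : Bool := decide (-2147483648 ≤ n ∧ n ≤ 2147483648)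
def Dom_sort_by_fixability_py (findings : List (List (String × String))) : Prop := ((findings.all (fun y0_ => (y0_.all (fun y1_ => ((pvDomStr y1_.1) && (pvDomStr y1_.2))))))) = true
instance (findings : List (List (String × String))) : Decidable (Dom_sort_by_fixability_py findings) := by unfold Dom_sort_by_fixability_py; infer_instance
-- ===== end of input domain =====

-- B replaces A's comparison sort keyed by (category, original index) with a one-pass
-- stable bucket sort into the four category buckets, concatenated in category order.

-- ===== PORT A =====
-- module constant _FIXABILITY_ORDER
def pvFixOrder : PySem.Dict String Int :=
  PySem.Dict.ofList [("trivial", 0), ("scoped", 1), ("unknown", 2), ("broad", 3)]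

-- _FIXABILITY_ORDER.get(f.get("fixability", "unknown"), 2)  (this expression appears verbatim in both sources)
def pvFixKey (f : List (String × String)) : Int :=
  PySem.Dict.getD pvFixOrder (PySem.Dict.getD (PySem.Dict.mk f) "fixability" "unknown") 2

def sort_by_fixability_py (findings : List (List (String × String))) : List (List (String × String)) :=
  -- indexed = sorted(enumerate(findings), key=lambda pair: (ORDER.get(...), pair[0]))
  let indexed := PySem.List.sorted2 (PySem.List.enumerate findings)
      (fun pair => pvFixKey pair.2) (fun pair => pair.1)
  -- [f for _, f in indexed]
  indexed.map (fun p => p.2)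

-- ===== PORT B =====
-- loop body: buckets[_FIXABILITY_ORDER.get(f.get("fixability","unknown"), 2)].append(f);
-- the tuple indexing by the computed key is ported as an if-chain (exact: the key is always 0,1,2 or 3).
def pvBucketStep (acc : List (List (String × String)) × List (List (String × String)) × List (List (String × String)) × List (List (String × String)))
    (f : List (String × String)) :
    List (List (String × String)) × List (List (String × String)) × List (List (String × String)) × List (List (String × String)) :=
  let c := pvFixKey f
  if c = 0 then (acc.1 ++ [f], acc.2.1, acc.2.2.1, acc.2.2.2)
  else if c = 1 then (acc.1, acc.2.1 ++ [f], acc.2.2.1, acc.2.2.2)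
  else if c = 2 then (acc.1, acc.2.1, acc.2.2.1 ++ [f], acc.2.2.2)
  else (acc.1, acc.2.1, acc.2.2.1, acc.2.2.2 ++ [f])

def sort_by_fixability_py_alt (findings : List (List (String × String))) : List (List (String × String)) :=
  let buckets := findings.foldl pvBucketStep ([], [], [], [])
  buckets.1 ++ buckets.2.1 ++ buckets.2.2.1 ++ buckets.2.2.2

-- ===== PRECONDITION & SPEC =====
def Spec_sort_by_fixability_py (findings : List (List (String × String))) (out : List (List (String × String))) : Prop := out = sort_by_fixability_py_alt findings
instance (findings : List (List (String × String))) (out : List (List (String × String))) : Decidable (Spec_sort_by_fixability_py findings out) := by unfold Spec_sort_by_fixability_py; infer_instance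

-- ===== CLAIM (what is proved, stated in full; the proofs are below) =====
def Claim_equal_sort_by_fixability_py : Prop := ∀ (findings : List (List (String × String))), Dom_sort_by_fixability_py findings → Spec_sort_by_fixability_py findings (sort_by_fixability_py findings)

-- ===== LEMMAS AND PROOFS =====

-- the strict "comes before" order A sorts by: (category, original index) lexicographically
def pvBefore (p q : Int × List (String × String)) : Bool :=
  decide (pvFixKey p.2 < pvFixKey q.2) ||
    (!decide (pvFixKey q.2 < pvFixKey p.2) && decide (p.1 < q.1))

lemma pvFixKey_range (f : List (String × String)) :
    pvFixKey f = 0 ∨ pvFixKey f = 1 ∨ pvFixKey f = 2 ∨ pvFixKey f = 3 := by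
  have hd : pvFixOrder = PySem.Dict.mk [("trivial", (0 : Int)), ("scoped", 1), ("unknown", 2), ("broad", 3)] := by decide
  unfold pvFixKey
  rw [hd]
  generalize PySem.Dict.getD (PySem.Dict.mk f) "fixability" "unknown" = s
  by_cases h0 : s = "trivial"
  · subst h0; left; decide
  by_cases h1 : s = "scoped"
  · subst h1; right; left; decide
  by_cases h2 : s = "unknown"
  · subst h2; right; right; left; decide
  by_cases h3 : s = "broad"
  · subst h3; right; right; right; decide
  have n0 : (("trivial" : String) == s) = false := beq_eq_false_iff_ne.mpr (fun h => h0 h.symm)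
  have n1 : (("scoped" : String) == s) = false := beq_eq_false_iff_ne.mpr (fun h => h1 h.symm)
  have n2 : (("unknown" : String) == s) = false := beq_eq_false_iff_ne.mpr (fun h => h2 h.symm)
  have n3 : (("broad" : String) == s) = false := beq_eq_false_iff_ne.mpr (fun h => h3 h.symm)
  right; right; left
  simp [PySem.Dict.getD, n0, n1, n2, n3, PySem.Dict.get?]

lemma pvBefore_asym (p q : Int × List (String × String)) :
    pvBefore p q = true → pvBefore q p = true → False := by
  simp only [pvBefore, Bool.or_eq_true, Bool.and_eq_true, Bool.not_eq_true',
    decide_eq_true_eq, decide_eq_false_iff_not]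
  omega

lemma pvBefore_total (p q : Int × List (String × String)) (h : pvBefore q p = false)
    (hne : p.1 ≠ q.1) : pvBefore p q = true := by
  revert h
  simp only [pvBefore, Bool.or_eq_true, Bool.and_eq_true, Bool.not_eq_true',
    Bool.or_eq_false_iff, Bool.and_eq_false_iff, Bool.not_eq_false',
    decide_eq_true_eq, decide_eq_false_iff_not]
  omega

lemma pvBefore_trans_nb (x y z : Int × List (String × String))
    (h1 : pvBefore x y = true) (h2 : pvBefore z y = false) : pvBefore z x = false := by
  revert h1 h2
  simp only [pvBefore, Bool.or_eq_true, Bool.and_eq_true, Bool.not_eq_true',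
    Bool.or_eq_false_iff, Bool.and_eq_false_iff, Bool.not_eq_false',
    decide_eq_true_eq, decide_eq_false_iff_not]
  omega

-- inserting preserves "no later element comes before an earlier one"
lemma insertBy_pairwise_nb {α : Type} (before : α → α → Bool)
    (H1 : ∀ a b, before a b = true → before b a = false)
    (H2 : ∀ x y z, before x y = true → before z y = false → before z x = false)
    (x : α) : ∀ ys : List α, ys.Pairwise (fun a b => before b a = false) →
      (PySem.List.insertBy before x ys).Pairwise (fun a b => before b a = false) := by
  intro ys
  induction ys with
  | nil => intro _; simp [PySem.List.insertBy]
  | cons y ys ih =>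
    intro hp
    rw [List.pairwise_cons] at hp
    obtain ⟨hy, hys⟩ := hp
    by_cases hxy : before x y = true
    · rw [show PySem.List.insertBy before x (y :: ys) = x :: y :: ys by
        simp [PySem.List.insertBy, hxy]]
      refine List.pairwise_cons.mpr ⟨?_, List.pairwise_cons.mpr ⟨hy, hys⟩⟩
      intro z hz
      rcases List.mem_cons.mp hz with rfl | hz'
      · exact H1 x z hxy
      · exact H2 x y z hxy (hy z hz')
    · rw [show PySem.List.insertBy before x (y :: ys) = y :: PySem.List.insertBy before x ys by
        simp [PySem.List.insertBy, hxy]]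
      refine List.pairwise_cons.mpr ⟨?_, ih hys⟩
      intro z hz
      rcases (PySem.List.insertBy_mem_iff before x z ys).mp hz with rfl | hz'
      · simpa using hxy
      · exact hy z hz'

lemma foldl_insertBy_pairwise_nb {α : Type} (before : α → α → Bool)
    (H1 : ∀ a b, before a b = true → before b a = false)
    (H2 : ∀ x y z, before x y = true → before z y = false → before z x = false) :
    ∀ (xs : List α) (acc : List α), acc.Pairwise (fun a b => before b a = false) →
      (xs.foldl (fun acc x => PySem.List.insertBy before x acc) acc).Pairwise
        (fun a b => before b a = false) := by
  intro xs
  induction xs with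
  | nil => intro acc h; simpa using h
  | cons x xs ih =>
    intro acc h
    simpa using ih _ (insertBy_pairwise_nb before H1 H2 x acc h)

-- two equally ordered permutations of each other (under an asymmetric relation) coincide
lemma eq_of_perm_of_pairwise_strict {α : Type} {R : α → α → Prop}
    (hasym : ∀ a b, R a b → R b a → False) :
    ∀ {l1 l2 : List α}, l1.Perm l2 → l1.Pairwise R → l2.Pairwise R → l1 = l2 := by
  intro l1
  induction l1 with
  | nil =>
    intro l2 hp _ _
    exact (List.Perm.nil_eq hp).symm ▸ rfl
  | cons a t ih =>
    intro l2 hp h1 h2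
    have ha : a ∈ l2 := hp.mem_iff.mp (List.mem_cons_self)
    obtain ⟨pre, suf, rfl⟩ := List.append_of_mem ha
    cases pre with
    | nil =>
      simp only [List.nil_append] at hp h2 ⊢
      have ht := hp.cons_inv
      rw [List.pairwise_cons] at h1 h2
      rw [ih ht h1.2 h2.2]
    | cons p ps =>
      exfalso
      rw [List.cons_append, List.pairwise_cons] at h2
      have hpa : R p a := h2.1 a (by simp)
      have hp_mem : p ∈ a :: t := hp.mem_iff.mpr (by simp)
      rcases List.mem_cons.mp hp_mem with rfl | hp_t
      · exact hasym p p hpa hpa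
      · exact hasym a p (List.rel_of_pairwise_cons h1 hp_t) hpa

-- a list splits (as a permutation) into its four key buckets
lemma perm_partition4 {α : Type} (g : α → Int) :
    ∀ l : List α, (∀ x ∈ l, g x = 0 ∨ g x = 1 ∨ g x = 2 ∨ g x = 3) →
      (l.filter (fun x => decide (g x = 0)) ++ l.filter (fun x => decide (g x = 1)) ++
        l.filter (fun x => decide (g x = 2)) ++ l.filter (fun x => decide (g x = 3))).Perm l := by
  intro l
  induction l with
  | nil => intro _; simp
  | cons x t ih =>
    intro h
    have ht := fun y hy => h y (List.mem_cons_of_mem x hy)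
    have hperm := ih ht
    have hp' : (t.filter (fun x => decide (g x = 0)) ++ (t.filter (fun x => decide (g x = 1)) ++
        (t.filter (fun x => decide (g x = 2)) ++ t.filter (fun x => decide (g x = 3))))).Perm t := by
      simpa [List.append_assoc] using hperm
    rcases h x List.mem_cons_self with hx | hx | hx | hx <;>
      simp only [List.filter_cons, hx, decide_eq_true_eq] <;> norm_num
    · exact hp'
    · exact List.perm_middle.trans (hp'.cons x)
    · rw [show t.filter (fun x => decide (g x = 0)) ++ (t.filter (fun x => decide (g x = 1)) ++
          (x :: (t.filter (fun x => decide (g x = 2)) ++ t.filter (fun x => decide (g x = 3))))) =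
          (t.filter (fun x => decide (g x = 0)) ++ t.filter (fun x => decide (g x = 1))) ++
          x :: (t.filter (fun x => decide (g x = 2)) ++ t.filter (fun x => decide (g x = 3))) from by simp]
      refine List.perm_middle.trans (List.Perm.cons x ?_)
      simpa [List.append_assoc] using hperm
    · rw [show t.filter (fun x => decide (g x = 0)) ++ (t.filter (fun x => decide (g x = 1)) ++
          (t.filter (fun x => decide (g x = 2)) ++ (x :: t.filter (fun x => decide (g x = 3))))) =
          (t.filter (fun x => decide (g x = 0)) ++ (t.filter (fun x => decide (g x = 1)) ++
          t.filter (fun x => decide (g x = 2)))) ++ x :: t.filter (fun x => decide (g x = 3)) from by simp]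
      refine List.perm_middle.trans (List.Perm.cons x ?_)
      simpa [List.append_assoc] using hperm

-- B's fold distributes the input into the four filters
lemma bucket_foldl_eq (xs : List (List (String × String))) :
    ∀ t s u b,
      xs.foldl pvBucketStep (t, s, u, b) =
        (t ++ xs.filter (fun x => decide (pvFixKey x = 0)),
         s ++ xs.filter (fun x => decide (pvFixKey x = 1)),
         u ++ xs.filter (fun x => decide (pvFixKey x = 2)),
         b ++ xs.filter (fun x => decide (pvFixKey x = 3))) := by
  induction xs with
  | nil => intro t s u b; simp
  | cons x xs ih =>
    intro t s u b
    rcases pvFixKey_range x with hx | hx | hx | hx <;>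
      simp [pvBucketStep, hx, List.foldl_cons, ih, List.append_assoc]

-- the tagged bucket concatenation that A's sort must equal
def pvTagged (findings : List (List (String × String))) : List (Int × List (String × String)) :=
  let E := PySem.List.enumerate findings
  E.filter (fun p => decide (pvFixKey p.2 = 0)) ++ E.filter (fun p => decide (pvFixKey p.2 = 1)) ++
    E.filter (fun p => decide (pvFixKey p.2 = 2)) ++ E.filter (fun p => decide (pvFixKey p.2 = 3))

lemma pvKey_of_mem_filter {i : Int} {E : List (Int × List (String × String))}
    {a : Int × List (String × String)}
    (ha : a ∈ E.filter (fun p => decide (pvFixKey p.2 = i))) : pvFixKey a.2 = i := by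
  have := List.of_mem_filter ha
  simpa using this

lemma pvBefore_of_key_lt {a b : Int × List (String × String)} {i j : Int}
    (ha : pvFixKey a.2 = i) (hb : pvFixKey b.2 = j) (hij : i < j) : pvBefore a b = true := by
  simp [pvBefore, ha, hb, hij]

lemma pvTagged_pairwise (findings : List (List (String × String))) :
    (pvTagged findings).Pairwise (fun p q => pvBefore p q = true) := by
  unfold pvTagged
  have hE := PySem.List.pairwise_lt_enumerate findings 0
  have hblock : ∀ i : Int,
      ((PySem.List.enumerate findings).filter (fun p => decide (pvFixKey p.2 = i))).Pairwise
        (fun p q => pvBefore p q = true) := by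
    intro i
    refine (hE.filter _).imp_of_mem ?_
    intro a b ha hb hlt
    have hka := pvKey_of_mem_filter ha
    have hkb := pvKey_of_mem_filter hb
    simp [pvBefore, hka, hkb, hlt]
  simp only [List.pairwise_append, List.mem_append]
  refine ⟨⟨⟨hblock 0, hblock 1, ?_⟩, hblock 2, ?_⟩, hblock 3, ?_⟩
  · intro a ha b hb
    exact pvBefore_of_key_lt (pvKey_of_mem_filter ha) (pvKey_of_mem_filter hb) (by norm_num)
  · intro a ha b hb
    rcases ha with ha | ha
    · exact pvBefore_of_key_lt (pvKey_of_mem_filter ha) (pvKey_of_mem_filter hb) (by norm_num)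
    · exact pvBefore_of_key_lt (pvKey_of_mem_filter ha) (pvKey_of_mem_filter hb) (by norm_num)
  · intro a ha b hb
    rcases ha with (ha | ha) | ha
    · exact pvBefore_of_key_lt (pvKey_of_mem_filter ha) (pvKey_of_mem_filter hb) (by norm_num)
    · exact pvBefore_of_key_lt (pvKey_of_mem_filter ha) (pvKey_of_mem_filter hb) (by norm_num)
    · exact pvBefore_of_key_lt (pvKey_of_mem_filter ha) (pvKey_of_mem_filter hb) (by norm_num)

lemma sorted2_eq_tagged (findings : List (List (String × String))) :
    PySem.List.sorted2 (PySem.List.enumerate findings)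
      (fun pair => pvFixKey pair.2) (fun pair => pair.1) = pvTagged findings := by
  have hE := PySem.List.pairwise_lt_enumerate findings 0
  have hSperm : (PySem.List.sorted2 (PySem.List.enumerate findings)
      (fun pair => pvFixKey pair.2) (fun pair => pair.1)).Perm
      (PySem.List.enumerate findings) :=
    PySem.List.sorted2_perm _ _ _ _
  have hfold : PySem.List.sorted2 (PySem.List.enumerate findings)
      (fun pair => pvFixKey pair.2) (fun pair => pair.1) =
      (PySem.List.enumerate findings).foldl
        (fun acc x => PySem.List.insertBy pvBefore x acc) [] := rfl
  have hnb : (PySem.List.sorted2 (PySem.List.enumerate findings)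
      (fun pair => pvFixKey pair.2) (fun pair => pair.1)).Pairwise
      (fun a b => pvBefore b a = false) := by
    rw [hfold]
    exact foldl_insertBy_pairwise_nb pvBefore
      (fun a b h => by
        cases hq : pvBefore b a with
        | false => rfl
        | true => exact (pvBefore_asym a b h hq).elim)
      pvBefore_trans_nb _ [] (List.Pairwise.nil)
  have hnodupE : ((PySem.List.enumerate findings).map Prod.fst).Nodup :=
    (List.pairwise_map.mpr (hE.imp (fun h => ne_of_lt h)))
  have hnodupS : ((PySem.List.sorted2 (PySem.List.enumerate findings)
      (fun pair => pvFixKey pair.2) (fun pair => pair.1)).map Prod.fst).Nodup :=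
    ((hSperm.map Prod.fst).nodup_iff).mpr hnodupE
  have hne : (PySem.List.sorted2 (PySem.List.enumerate findings)
      (fun pair => pvFixKey pair.2) (fun pair => pair.1)).Pairwise
      (fun p q => p.1 ≠ q.1) := List.pairwise_map.mp hnodupS
  have hSlt : (PySem.List.sorted2 (PySem.List.enumerate findings)
      (fun pair => pvFixKey pair.2) (fun pair => pair.1)).Pairwise
      (fun p q => pvBefore p q = true) :=
    (hnb.and hne).imp (fun h => pvBefore_total _ _ h.1 h.2)
  have hTperm : (pvTagged findings).Perm (PySem.List.enumerate findings) := by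
    unfold pvTagged
    simpa [List.append_assoc] using
      perm_partition4 (fun p => pvFixKey p.2) (PySem.List.enumerate findings)
        (fun x _ => pvFixKey_range x.2)
  exact eq_of_perm_of_pairwise_strict (fun a b => pvBefore_asym a b)
    (hSperm.trans hTperm.symm) hSlt (pvTagged_pairwise findings)

-- ===== VERDICT (by name: the statement is the Claim_ definition above) =====
theorem sort_by_fixability_py_spec : Claim_equal_sort_by_fixability_py := by
  intro findings _
  unfold Spec_sort_by_fixability_py
  show sort_by_fixability_py findings = sort_by_fixability_py_alt findings
  unfold sort_by_fixability_py sort_by_fixability_py_alt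
  rw [sorted2_eq_tagged, bucket_foldl_eq]
  have hmap : ∀ i : Int,
      ((PySem.List.enumerate findings).filter (fun p => decide (pvFixKey p.2 = i))).map
        (fun p => p.2) = findings.filter (fun x => decide (pvFixKey x = i)) := by
    intro i
    have h := @List.filter_map (Int × List (String × String)) (List (String × String))
      Prod.snd (fun x => decide (pvFixKey x = i)) (PySem.List.enumerate findings)
    rw [show (List.map Prod.snd (PySem.List.enumerate findings) : List (List (String × String)))
        = findings from PySem.List.map_snd_enumerate findings 0] at h
    exact h.symm
  simp only [pvTagged, List.map_append, List.nil_append, hmap, List.append_assoc]
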